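-- pv_equiv track=rewrite | github.com/hasadi-ha/ZXCVBN_Project | cases/Word_Frequency_Check.py | map_inputData
-- ===== SOURCE A (Python) =====
-- def map_inputData(tokens):
--     hash_map = {}
--
--     # Make sure something is in token
--     if tokens is not None:
--         for element in tokens:
--             # Check for leet
--             leet = str.maketrans('@361109$7', 'aegiloqst')
--             word = str.translate(element, leet)
--
--             # Word Exist?
--             if word in hash_map:
--                 hash_map[word] = hash_map[word] + 1
--             else:
--                 hash_map[word] = 1
--
--         return hash_map
--     else:
--         return None
-- ===== SOURCE B (Python) =====
-- def map_inputData(tokens):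
--     if tokens is None:
--         return None
--     leet = str.maketrans('@361109$7', 'aegiloqst')
--     words = [str.translate(t, leet) for t in tokens]
--     # sort-then-run-length counting pass, then rebuild in first-occurrence order
--     cnt = {}
--     run_word = None
--     run_len = 0
--     for w in sorted(words):
--         if w == run_word:
--             run_len += 1
--         else:
--             if run_len > 0:
--                 cnt[run_word] = run_len
--             run_word = w
--             run_len = 1
--     if run_len > 0:
--         cnt[run_word] = run_len
--     return {w: cnt[w] for w in words}
-- ===== Notes on version B (the rewrite author's own statement) =====
-- stated objective: alternative
-- what changed: B replaces A's per-element hash-map accumulation with a sort of the leet-normalized words followed by a run-length scan over the sorted list to get each word's count, then a comprehension over the original word list rebuilds the dict in first-occurrence key order.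
import Mathlib
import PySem

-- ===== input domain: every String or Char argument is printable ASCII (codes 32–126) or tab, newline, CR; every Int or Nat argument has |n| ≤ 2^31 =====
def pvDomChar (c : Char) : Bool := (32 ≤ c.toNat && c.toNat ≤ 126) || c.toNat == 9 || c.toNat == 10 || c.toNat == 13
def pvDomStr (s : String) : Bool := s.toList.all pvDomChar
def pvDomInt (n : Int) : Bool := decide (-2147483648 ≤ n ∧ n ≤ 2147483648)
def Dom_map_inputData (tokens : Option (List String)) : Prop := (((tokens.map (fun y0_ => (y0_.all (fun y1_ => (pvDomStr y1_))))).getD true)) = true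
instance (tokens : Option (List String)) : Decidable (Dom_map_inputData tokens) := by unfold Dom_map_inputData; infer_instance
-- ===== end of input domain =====

-- B replaces A's per-element hash accumulation with a sort-then-run-length counting pass
-- plus a comprehension restoring first-occurrence key order (objective: alternative).

-- ===== PORT A =====
-- hand port of str.translate with str.maketrans('@361109$7', 'aegiloqst') (duplicate key '1':
-- the later mapping '1'→'l' wins, as in CPython); exact on all of Dom: a char-by-char map.
def leetChar (c : Char) : Char :=
  if c = '@' then 'a'
  else if c = '3' then 'e'
  else if c = '6' then 'g'
  else if c = '1' then 'l'
  else if c = '0' then 'o'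
  else if c = '9' then 'q'
  else if c = '$' then 's'
  else if c = '7' then 't'
  else c

def leetTranslate (s : String) : String := String.ofList (s.toList.map leetChar)

def map_inputData (tokens : Option (List String)) : Option (List (String × Int)) :=
  match tokens with
  | none => none
  | some ts =>
    some ((ts.foldl (fun hash_map element =>
        let word := leetTranslate element
        if hash_map.contains word then
          hash_map.insert word (hash_map.getD word 0 + 1)
        else
          hash_map.insert word 1)
      (PySem.Dict.empty : PySem.Dict String Int)).items)

-- ===== PORT B =====
-- loop body of B's run-length pass; state = (cnt, run_word, run_len); Python's run_word = None
-- is the Option's none, and `w == run_word` is False against None, exactly `some w = runw`.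
-- (run_word is None only while run_len == 0, so the guarded insert never sees None.)
def rlStep (st : PySem.Dict String Int × Option String × Int) (w : String) :
    PySem.Dict String Int × Option String × Int :=
  match st with
  | (cnt, runw, runlen) =>
    if some w = runw then (cnt, runw, runlen + 1)
    else
      (match runw with
       | some r => if 0 < runlen then cnt.insert r runlen else cnt
       | none => cnt, some w, 1)

-- the trailing `if run_len > 0: cnt[run_word] = run_len` after the loop
def rlFinish (st : PySem.Dict String Int × Option String × Int) : PySem.Dict String Int :=
  match st with
  | (cnt, runw, runlen) =>
    match runw with
    | some r => if 0 < runlen then cnt.insert r runlen else cnt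
    | none => cnt

def map_inputData_alt (tokens : Option (List String)) : Option (List (String × Int)) :=
  match tokens with
  | none => none
  | some ts =>
    let words := ts.map leetTranslate
    let cnt := rlFinish ((PySem.List.sorted words (fun x => x) false).foldl rlStep
      ((PySem.Dict.empty : PySem.Dict String Int), none, 0))
    -- Python's cnt[w]: the key is always present (w occurs in sorted(words)), so getD's
    -- default is unreachable
    some ((words.foldl (fun d w => d.insert w (cnt.getD w 0)) PySem.Dict.empty).items)

-- ===== PRECONDITION & SPEC =====
def Spec_map_inputData (tokens : Option (List String)) (out : Option (List (String × Int))) : Prop := out = map_inputData_alt tokens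
instance (tokens : Option (List String)) (out : Option (List (String × Int))) : Decidable (Spec_map_inputData tokens out) := by unfold Spec_map_inputData; infer_instance

-- ===== CLAIM (what is proved, stated in full; the proofs are below) =====
def Claim_equal_map_inputData : Prop := ∀ (tokens : Option (List String)), Dom_map_inputData tokens → Spec_map_inputData tokens (map_inputData tokens)

-- ===== LEMMAS AND PROOFS =====

-- A's loop body is pointwise the counter step 'insert w (getD w 0 + 1)'.
theorem mapA_body_eq :
    (fun (hash_map : PySem.Dict String Int) (element : String) =>
        let word := leetTranslate element
        if hash_map.contains word then
          hash_map.insert word (hash_map.getD word 0 + 1)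
        else
          hash_map.insert word 1)
    = (fun (d : PySem.Dict String Int) (e : String) =>
        d.insert (leetTranslate e) (d.getD (leetTranslate e) 0 + 1)) := by
  funext d e
  by_cases h : d.contains (leetTranslate e)
  · simp [h]
  · simp only [Bool.not_eq_true] at h
    simp [h, PySem.Dict.getD_of_not_contains d 0 h]

-- the lookup of a fold of inserts whose values depend only on the key
theorem getD_foldl_insert_const (c : String → Int) (ws : List String)
    (d : PySem.Dict String Int) (k : String) :
    (ws.foldl (fun d w => d.insert w (c w)) d).getD k 0
      = if k ∈ ws then c k else d.getD k 0 := by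
  induction ws generalizing d with
  | nil => simp
  | cons w ws ih =>
    simp only [List.foldl_cons, ih, PySem.Dict.getD_insert, List.mem_cons]
    by_cases hkw : k = w <;> by_cases hks : k ∈ ws <;> simp [hkw, hks]

-- B's second fold realises the table (ofList ws).map (k, c k)
theorem items_foldl_insert_const (c : String → Int) (ws : List String) :
    ((ws.foldl (fun d w => d.insert w (c w)) (PySem.Dict.empty : PySem.Dict String Int)).items)
      = (PySem.Set.ofList ws).map (fun k => (k, c k)) := by
  have hnd : ((ws.foldl (fun d w => d.insert w (c w)) (PySem.Dict.empty : PySem.Dict String Int)).keys).Nodup :=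
    PySem.Dict.nodup_keys_foldl_insert _ _ _ PySem.Dict.nodup_keys_empty
  have hkeys : ((ws.foldl (fun d w => d.insert w (c w)) (PySem.Dict.empty : PySem.Dict String Int)).keys)
      = PySem.Set.ofList ws := by
    rw [PySem.Dict.keys_foldl_insert]
    simp [PySem.Dict.keys_empty, PySem.Set.update, PySem.Set.ofList_eq_foldl]
  rw [PySem.Dict.items_eq_map_keys _ hnd 0, hkeys]
  refine List.map_congr_left ?_
  intro k hk
  rw [getD_foldl_insert_const]
  simp [(PySem.List.mem_dedup ws k).mp hk]

-- run-length invariant: on a sorted remainder l with an open run (r, n), the machine's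
-- final dict reads n + count l r at r, count l k at other members of l, and cnt elsewhere
theorem rl_invariant (l : List String) :
    ∀ (cnt : PySem.Dict String Int) (r : String) (n : Int), 1 ≤ n →
      (r :: l).Pairwise (· ≤ ·) → ∀ k,
      (rlFinish (l.foldl rlStep (cnt, some r, n))).getD k 0
        = if k = r then n + (l.count r : Int)
          else if k ∈ l then (l.count k : Int)
          else cnt.getD k 0 := by
  induction l with
  | nil =>
    intro cnt r n hn _ k
    simp only [List.foldl_nil, rlFinish]
    rw [if_pos (by omega)]
    by_cases hk : k = r <;> simp [PySem.Dict.getD_insert, hk]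
  | cons w l ih =>
    intro cnt r n hn hp k
    by_cases hw : w = r
    · subst hw
      have hstep : rlStep (cnt, some w, n) w = (cnt, some w, n + 1) := by
        simp [rlStep]
      rw [List.foldl_cons, hstep, ih cnt w (n + 1) (by omega) hp.tail]
      by_cases hk : k = w
      · simp [hk, List.count_cons_self]; ring
      · simp [hk, Ne.symm hk, List.mem_cons]
    · have hstep : rlStep (cnt, some r, n) w = (cnt.insert r n, some w, 1) := by
        simp [rlStep, hw, show (0:Int) < n by omega]
      have hrw : r ≤ w := (List.pairwise_cons.mp hp).1 w (by simp)
      have hrl : r ∉ l := by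
        intro hmem
        have hwl : w ≤ r := (List.pairwise_cons.mp hp.tail).1 r hmem
        exact hw (le_antisymm hwl hrw)
      rw [List.foldl_cons, hstep, ih (cnt.insert r n) w 1 le_rfl hp.tail]
      by_cases hk : k = r
      · subst hk
        simp [hw, Ne.symm hw, hrl, List.count_eq_zero_of_not_mem hrl]
      · by_cases hkw : k = w
        · subst hkw
          simp [hk, List.count_cons_self]; ring
        · by_cases hkl : k ∈ l
          · simp [hk, hkw, hkl, Ne.symm hkw]
          · simp [hk, hkw, hkl, PySem.Dict.getD_insert]

-- starting from the empty machine state, the final dict is exactly the multiset of counts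
theorem rl_counts (l : List String) (hp : l.Pairwise (· ≤ ·)) (k : String) :
    (rlFinish (l.foldl rlStep ((PySem.Dict.empty : PySem.Dict String Int), none, 0))).getD k 0
      = (l.count k : Int) := by
  cases l with
  | nil => simp [rlFinish]
  | cons w l =>
    have hstep : rlStep ((PySem.Dict.empty : PySem.Dict String Int), none, 0) w
        = ((PySem.Dict.empty : PySem.Dict String Int), some w, 1) := by
      simp [rlStep]
    rw [List.foldl_cons, hstep, rl_invariant l PySem.Dict.empty w 1 le_rfl hp k]
    by_cases hk : k = w
    · simp [hk, List.count_cons_self]; ring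
    · by_cases hkl : k ∈ l
      · simp [hk, hkl, Ne.symm hk]
      · simp [hk, hkl, Ne.symm hk, List.count_eq_zero_of_not_mem hkl]

-- ===== VERDICT (by name: the statement is the Claim_ definition above) =====
theorem map_inputData_spec : Claim_equal_map_inputData := by
  intro tokens _
  unfold Spec_map_inputData map_inputData map_inputData_alt
  cases tokens with
  | none => rfl
  | some ts =>
    simp only [Option.some.injEq]
    rw [mapA_body_eq, ← List.foldl_map (f := leetTranslate)
        (g := fun (d : PySem.Dict String Int) w => d.insert w (d.getD w 0 + 1)),
      PySem.Dict.foldl_insert_getD_add_one_eq_counter, PySem.Dict.items_counter,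
      items_foldl_insert_const]
    refine List.map_congr_left ?_
    intro k hk
    have hperm := PySem.List.sorted_perm (ts.map leetTranslate) (fun x => x) false
    rw [rl_counts _ (PySem.List.sorted_pairwise (ts.map leetTranslate) (fun x => x)),
      hperm.count_eq]
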